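-- pv_equiv track=rewrite | github.com/getmyracksup/python-forca | forca.py | filterResposta
-- ===== SOURCE A (Python) =====
-- def filterResposta(palavra: str, resposta: str) -> str:
--     posicoes = []
--     for i, j in enumerate(resposta):
--         if j == "_":
--             posicoes.append(i)
--     for posicao in posicoes:
--         palavra = palavra[:posicao] + '_' + palavra[posicao+1:]
--     return palavra
-- ===== SOURCE B (Python) =====
-- def filterResposta(palavra: str, resposta: str) -> str:
--     return ''.join('_' if i < len(resposta) and resposta[i] == '_' else c
--                    for i, c in enumerate(palavra))
-- ===== Notes on version B (the rewrite author's own statement) =====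
-- stated objective: simpler
-- what changed: Replaces the positions-list build plus repeated string slicing/concatenation with a single masking pass over palavra.
-- intended difference: When resposta has an underscore at an index >= len(palavra), A's out-of-range slicing accidentally appends one '_' per such underscore past the masked word, while B returns just the masked word, which is the intended value since those positions name no letter of palavra. — e.g. on filterResposta("a", "__"): A returns "__", B returns "_"
import Mathlib
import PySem

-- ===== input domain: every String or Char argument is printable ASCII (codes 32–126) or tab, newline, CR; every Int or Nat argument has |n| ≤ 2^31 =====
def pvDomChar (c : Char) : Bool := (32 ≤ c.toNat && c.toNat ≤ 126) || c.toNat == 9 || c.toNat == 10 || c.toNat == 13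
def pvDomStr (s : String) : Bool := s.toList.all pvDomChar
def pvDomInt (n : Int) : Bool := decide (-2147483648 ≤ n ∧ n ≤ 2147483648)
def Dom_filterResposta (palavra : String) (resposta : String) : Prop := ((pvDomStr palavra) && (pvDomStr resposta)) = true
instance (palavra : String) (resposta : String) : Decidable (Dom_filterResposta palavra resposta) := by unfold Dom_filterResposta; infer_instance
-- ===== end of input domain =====

-- B replaces A's positions-list build + repeated slicing/concatenation by a single masking
-- pass over palavra (objective: simpler); A's appended underscores for out-of-range masks
-- are stated as an intended difference (D_ below).


-- ===== PORT A =====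
-- first loop of A: collect the indices of '_' in resposta
def frA_posicoes (r : List Char) : List Int :=
  (PySem.List.enumerate r 0).foldl (fun acc ij => if ij.2 == '_' then acc ++ [ij.1] else acc) []

-- second loop of A: for each position, palavra = palavra[:p] + '_' + palavra[p+1:]
def frA_loop (w : List Char) (ps : List Int) : List Char :=
  ps.foldl (fun w p => PySem.List.slice w none (some p) ++ ['_'] ++ PySem.List.slice w (some (p + 1)) none) w

def filterResposta (palavra : String) (resposta : String) : String :=
  String.ofList (frA_loop palavra.toList (frA_posicoes resposta.toList))

-- ===== PORT B =====
def filterResposta_alt (palavra : String) (resposta : String) : String :=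
  -- ''.join('_' if i < len(resposta) and resposta[i]=='_' else c for i,c in enumerate(palavra));
  -- i is a nonnegative enumerate index, so the guard is exactly 'pyGet? r i = some '_''
  -- (pyGet? is none precisely when i is out of range).
  String.ofList ((PySem.List.enumerate palavra.toList 0).map
    (fun ic => if PySem.List.pyGet? resposta.toList ic.1 = some '_' then '_' else ic.2))

-- ===== PRECONDITION & SPEC =====
-- When resposta has an underscore at an index ≥ len(palavra), A's out-of-range slicing
-- accidentally appends one '_' per such underscore past the masked word, while B returns
-- just the masked word, which is the intended value since those positions name no letter of palavra.
def D_filterResposta (palavra : String) (resposta : String) : Prop :=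
  ((resposta.toList.drop palavra.toList.length).any (fun j => j == '_')) = true
instance (palavra : String) (resposta : String) : Decidable (D_filterResposta palavra resposta) := by unfold D_filterResposta; infer_instance

def Spec_filterResposta (palavra : String) (resposta : String) (out : String) : Prop :=
  ¬ D_filterResposta palavra resposta → out = filterResposta_alt palavra resposta
instance (palavra : String) (resposta : String) (out : String) : Decidable (Spec_filterResposta palavra resposta out) := by unfold Spec_filterResposta; infer_instance

def pvDiffWitness_filterResposta : String × String := ("a", "__")
def pvDiffWitnessOut_filterResposta : String × String := ("__", "_")

-- ===== CLAIM (what is proved, stated in full; the proofs are below) =====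
def Claim_unchanged_filterResposta : Prop := ∀ (palavra : String) (resposta : String), Dom_filterResposta palavra resposta → Spec_filterResposta palavra resposta (filterResposta palavra resposta)
def Claim_changed_filterResposta : Prop := Dom_filterResposta (pvDiffWitness_filterResposta.1) (pvDiffWitness_filterResposta.2) ∧ D_filterResposta (pvDiffWitness_filterResposta.1) (pvDiffWitness_filterResposta.2) ∧ filterResposta (pvDiffWitness_filterResposta.1) (pvDiffWitness_filterResposta.2) = pvDiffWitnessOut_filterResposta.1 ∧ filterResposta_alt (pvDiffWitness_filterResposta.1) (pvDiffWitness_filterResposta.2) = pvDiffWitnessOut_filterResposta.2 ∧ pvDiffWitnessOut_filterResposta.1 ≠ pvDiffWitnessOut_filterResposta.2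
def Claim_exact_filterResposta : Prop := ∀ (palavra : String) (resposta : String), Dom_filterResposta palavra resposta → D_filterResposta palavra resposta → filterResposta palavra resposta ≠ filterResposta_alt palavra resposta

-- ===== LEMMAS AND PROOFS =====

-- A's result, characterised: mask the in-range positions, append one '_' per out-of-range position.
def maskHead (w : List Char) (ps : List Int) : List Char :=
  (PySem.List.enumerate w 0).map (fun ic => if ic.1 ∈ ps then '_' else ic.2)

theorem length_maskHead (w : List Char) (ps : List Int) : (maskHead w ps).length = w.length := by
  simp [maskHead, PySem.List.length_enumerate]

theorem getElem_maskHead (w : List Char) (ps : List Int) (k : Nat) (hk : k < w.length) :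
    (maskHead w ps)[k]'(by rw [length_maskHead]; exact hk) = if ((k : Int)) ∈ ps then '_' else w[k] := by
  simp [maskHead, PySem.List.getElem_enumerate]

theorem maskHead_of_all_ge (w : List Char) (ps : List Int)
    (h : ∀ q ∈ ps, (w.length : Int) ≤ q) : maskHead w ps = w := by
  unfold maskHead
  have : ∀ ic ∈ PySem.List.enumerate w 0,
      (if ic.1 ∈ ps then '_' else ic.2) = ic.2 := by
    intro ic hic
    rcases (PySem.List.mem_enumerate_iff _ _ _).1 hic with ⟨k, hk, rfl⟩
    have hnot : ((0 : Int) + k) ∉ ps := by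
      intro hm; have := h _ hm; omega
    show (if ((0 : Int) + k) ∈ ps then '_' else w[k]) = w[k]
    rw [if_neg hnot]
  rw [List.map_congr_left this, PySem.List.map_snd_enumerate]

theorem getElem_splice (w : List Char) (pn : Nat) (hlt : pn < w.length) (k : Nat) (hk : k < w.length) :
    (w.take pn ++ ['_'] ++ w.drop (pn + 1))[k]'(by simp; omega) = if k = pn then '_' else w[k] := by
  rcases lt_trichotomy k pn with h | h | h
  · rw [List.getElem_append_left (by simp; omega)]
    rw [List.getElem_append_left (by simp; omega)]
    simp [List.getElem_take, Nat.ne_of_lt h]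
  · subst h
    rw [List.getElem_append_left (by simp; omega)]
    rw [List.getElem_append_right (by simp)]
    simp
  · rw [List.getElem_append_right (by simp; omega)]
    simp [List.getElem_drop, Nat.ne_of_gt h]
    congr 1
    omega

theorem frA_loop_eq (ps : List Int) : ∀ (w : List Char),
    (∀ p ∈ ps, 0 ≤ p) → ps.Pairwise (· < ·) →
    frA_loop w ps = maskHead w ps ++ List.replicate (ps.countP (fun p => (w.length : Int) ≤ p)) '_' := by
  induction ps with
  | nil =>
      intro w _ _
      simp [frA_loop, maskHead, PySem.List.map_snd_enumerate]
  | cons p ps ih =>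
      intro w hpos hsort
      have hp : 0 ≤ p := hpos p (by simp)
      have hsl1 : PySem.List.slice w none (some p) = w.take p.toNat :=
        PySem.List.slice_to _ hp
      have hsl2 : PySem.List.slice w (some (p + 1)) none = w.drop (p.toNat + 1) := by
        rw [PySem.List.slice_from _ (by omega : (0:Int) ≤ p + 1)]
        congr 1
        omega
      have hstep : frA_loop w (p :: ps) = frA_loop (w.take p.toNat ++ ['_'] ++ w.drop (p.toNat + 1)) ps := by
        simp [frA_loop, hsl1, hsl2]
      rw [hstep]
      by_cases hlt : p.toNat < w.length
      · -- in-range position: a replace, length unchanged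
        set w' := w.take p.toNat ++ ['_'] ++ w.drop (p.toNat + 1) with hw'
        have hlen' : w'.length = w.length := by simp [hw']; omega
        rw [ih w' (fun q hq => hpos q (by simp [hq])) hsort.of_cons]
        have hcnt : (p :: ps).countP (fun q => (w.length : Int) ≤ q) = ps.countP (fun q => (w.length : Int) ≤ q) := by
          rw [List.countP_cons]
          simp only [decide_eq_true_eq]
          have : ¬ ((w.length : Int) ≤ p) := by omega
          simp [this]
        rw [hcnt, hlen']
        congr 1
        apply List.ext_getElem
        · rw [length_maskHead, length_maskHead, hlen']
        · intro k hk1 hk2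
          have hkw : k < w.length := by rwa [length_maskHead, hlen'] at hk1
          have hkw' : k < w'.length := by omega
          rw [getElem_maskHead w' ps k hkw', getElem_maskHead w (p :: ps) k hkw]
          have hsp : w'[k]'(by simp [hw']; omega) = if k = p.toNat then '_' else w[k] :=
            getElem_splice w p.toNat hlt k hkw
          have hiff : (k : Int) = p ↔ k = p.toNat := by omega
          simp only [hsp]
          by_cases hA : (k : Int) ∈ ps
          · have hC : (k : Int) ∈ p :: ps := List.mem_cons.2 (Or.inr hA)
            rw [if_pos hA, if_pos hC]
          · by_cases hB : k = p.toNat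
            · have hC : (k : Int) ∈ p :: ps := List.mem_cons.2 (Or.inl (hiff.2 hB))
              rw [if_neg hA, if_pos hB, if_pos hC]
            · have hC : (k : Int) ∉ p :: ps := by
                rw [List.mem_cons]
                rintro (h | h)
                · exact hB (hiff.1 h)
                · exact hA h
              rw [if_neg hA, if_neg hB, if_neg hC]
      · -- out-of-range position: one '_' is appended
        have hle : w.length ≤ p.toNat := by omega
        have h1 : w.take p.toNat = w := List.take_of_length_le hle
        have h2 : w.drop (p.toNat + 1) = [] := List.drop_eq_nil_of_le (by omega)
        rw [h1, h2, List.append_nil]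
        have hge : ∀ q ∈ ps, ((w ++ ['_']).length : Int) ≤ q := by
          intro q hq
          have hpq : p < q := (List.pairwise_cons.1 hsort).1 q hq
          simp
          omega
        rw [ih (w ++ ['_']) (fun q hq => hpos q (by simp [hq])) hsort.of_cons]
        rw [maskHead_of_all_ge _ _ hge]
        have hA : ps.countP (fun q => ((w ++ ['_']).length : Int) ≤ q) = ps.length :=
          List.countP_eq_length.2 (fun q hq => by simpa using hge q hq)
        have hB : (p :: ps).countP (fun q => (w.length : Int) ≤ q) = ps.length + 1 := by
          rw [List.countP_eq_length.2]
          · simp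
          · intro q hq
            rcases List.mem_cons.1 hq with rfl | hq'
            · simpa using (by omega : (w.length : Int) ≤ q)
            · have := hge q hq'
              simp at this ⊢
              omega
        have hm : maskHead w (p :: ps) = w := by
          apply maskHead_of_all_ge
          intro q hq
          rcases List.mem_cons.1 hq with rfl | hq'
          · omega
          · have := hge q hq'; simp at this; omega
        rw [hA, hB, hm]
        simp [List.replicate_succ, List.append_assoc]

theorem posicoes_eq (r : List Char) :
    frA_posicoes r = ((PySem.List.enumerate r 0).filter (fun ij => ij.2 == '_')).map (·.1) := by
  unfold frA_posicoes
  rw [PySem.List.foldl_append_if]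
  simp

theorem posicoes_pairwise (r : List Char) : (frA_posicoes r).Pairwise (· < ·) := by
  rw [posicoes_eq, List.pairwise_map]
  exact (PySem.List.pairwise_lt_enumerate r 0).filter _

theorem posicoes_nonneg (r : List Char) : ∀ p ∈ frA_posicoes r, 0 ≤ p := by
  intro p hp
  rw [posicoes_eq] at hp
  rcases List.mem_map.1 hp with ⟨ij, hij, rfl⟩
  rcases (PySem.List.mem_enumerate_iff _ _ _).1 (List.mem_filter.1 hij).1 with ⟨k, hk, rfl⟩
  simp

theorem mem_posicoes (r : List Char) (k : Nat) :
    ((k : Int) ∈ frA_posicoes r) ↔ PySem.List.pyGet? r (k : Int) = some '_' := by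
  rw [posicoes_eq, PySem.List.pyGet?_natCast]
  constructor
  · intro h
    rcases List.mem_map.1 h with ⟨ij, hij, hfst⟩
    rcases List.mem_filter.1 hij with ⟨hmem, hund⟩
    rcases (PySem.List.mem_enumerate_iff _ _ _).1 hmem with ⟨j, hj, rfl⟩
    simp at hund hfst
    have : j = k := by omega
    subst this
    simp [List.getElem?_eq_getElem hj, hund]
  · intro h
    rcases List.getElem?_eq_some_iff.1 h with ⟨hk, hval⟩
    apply List.mem_map.2
    refine ⟨((k : Int), r[k]), List.mem_filter.2 ⟨?_, by simp [hval]⟩, rfl⟩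
    exact (PySem.List.mem_enumerate_iff _ _ _).2 ⟨k, hk, by simp⟩

theorem count_posicoes_aux (r : List Char) : ∀ (s n : Nat),
    ((((PySem.List.enumerate r (s : Int)).filter (fun ij => ij.2 == '_')).map (·.1)).countP
        (fun p => decide ((n : Int) ≤ p)))
      = (r.drop (n - s)).countP (fun j => j == '_') := by
  induction r with
  | nil => intro s n; simp
  | cons c r ih =>
      intro s n
      have hcast : ((s : Int) + 1) = (((s + 1 : Nat)) : Int) := by push_cast; ring
      rw [PySem.List.enumerate_cons, hcast, List.filter_cons]
      by_cases hc : (c == '_') = true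
      · rw [if_pos hc, List.map_cons, List.countP_cons, ih (s + 1) n]
        by_cases hns : n ≤ s
        · have hd2 : n - (s + 1) = 0 := by omega
          have hd1 : n - s = 0 := by omega
          have hle : (decide ((n : Int) ≤ ((s : Nat) : Int))) = true := by simp; omega
          rw [hd1, hd2, List.drop_zero, List.drop_zero, List.countP_cons, hle, hc]
        · have hd1 : n - s = (n - (s + 1)) + 1 := by omega
          have hle : (decide ((n : Int) ≤ ((s : Nat) : Int))) = false := by simp; omega
          rw [hd1, List.drop_succ_cons, hle]
          simp
      · rw [if_neg hc, ih (s + 1) n]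
        by_cases hns : n ≤ s
        · have hd2 : n - (s + 1) = 0 := by omega
          have hd1 : n - s = 0 := by omega
          rw [hd1, hd2, List.drop_zero, List.drop_zero, List.countP_cons]
          have : (c == '_') = false := by simpa using hc
          rw [this]
          simp
        · have hd1 : n - s = (n - (s + 1)) + 1 := by omega
          rw [hd1, List.drop_succ_cons]

theorem count_posicoes (r : List Char) (n : Nat) :
    (frA_posicoes r).countP (fun p => decide ((n : Int) ≤ p)) = (r.drop n).countP (fun j => j == '_') := by
  rw [posicoes_eq]
  have h := count_posicoes_aux r 0 n
  simpa using h

-- A = maskHead ++ tail; B = maskHead (as a String of that list)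
theorem A_decomposed (palavra resposta : String) :
    filterResposta palavra resposta
      = String.ofList ((PySem.List.enumerate palavra.toList 0).map
            (fun ic => if PySem.List.pyGet? resposta.toList ic.1 = some '_' then '_' else ic.2)
          ++ List.replicate ((resposta.toList.drop palavra.toList.length).countP (fun j => j == '_')) '_') := by
  unfold filterResposta
  set w := palavra.toList
  set r := resposta.toList
  rw [frA_loop_eq (frA_posicoes r) w (posicoes_nonneg r) (posicoes_pairwise r)]
  have hhead : maskHead w (frA_posicoes r)
      = (PySem.List.enumerate w 0).map (fun ic => if PySem.List.pyGet? r ic.1 = some '_' then '_' else ic.2) := by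
    unfold maskHead
    apply List.map_congr_left
    intro ic hic
    rcases (PySem.List.mem_enumerate_iff _ _ _).1 hic with ⟨k, hk, rfl⟩
    show (if ((0 : Int) + k) ∈ frA_posicoes r then '_' else w[k])
        = (if PySem.List.pyGet? r ((0 : Int) + k) = some '_' then '_' else w[k])
    simp only [zero_add]
    by_cases hmem : (k : Int) ∈ frA_posicoes r
    · rw [if_pos hmem, if_pos ((mem_posicoes r k).1 hmem)]
    · rw [if_neg hmem, if_neg (fun h => hmem ((mem_posicoes r k).2 h))]
  rw [hhead, count_posicoes r w.length]

-- ===== VERDICT (by name: the statement is the Claim_ definition above) =====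
theorem filterResposta_spec : Claim_unchanged_filterResposta := by
  intro palavra resposta _ hnd
  unfold D_filterResposta at hnd
  rw [A_decomposed]
  have hz : (resposta.toList.drop palavra.toList.length).countP (fun j => j == '_') = 0 := by
    rw [List.countP_eq_zero]
    intro j hj hjc
    exact hnd (List.any_eq_true.2 ⟨j, hj, hjc⟩)
  rw [hz]
  simp [filterResposta_alt]

theorem filterResposta_changed : Claim_changed_filterResposta := by
  unfold Claim_changed_filterResposta; decide

theorem filterResposta_tight : Claim_exact_filterResposta := by
  intro palavra resposta _ hd heq
  rw [A_decomposed] at heq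
  unfold filterResposta_alt at heq
  unfold D_filterResposta at hd
  have hlist := String.ofList_inj.mp heq
  have hlen := congrArg List.length hlist
  simp only [List.length_append, List.length_replicate] at hlen
  rcases List.any_eq_true.1 hd with ⟨j, hj, hjc⟩
  have hpos : 0 < (resposta.toList.drop palavra.toList.length).countP (fun j => j == '_') :=
    List.countP_pos_iff.2 ⟨j, hj, hjc⟩
  omega
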